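-- pv_equiv track=rewrite | github.com/sundharvs/warehouse_robots | compare_and_plot.py | count_transitions_until_target
-- ===== SOURCE A (Python) =====
-- def count_transitions_until_target(path, target_location):
--     if len(path) < 2:
--         return 0
--
--     transitions = 0
--     prev_point = path[0]
--     #need to add the case where we start at helpsite
--     if path[0] == target_location:
--         return 0
--
--
--     for point in path[1:]:
--         if point != prev_point:
--             transitions += 1
--         if point == target_location:
--             break
--         prev_point = point
--
--     return transitions
-- ===== SOURCE B (Python) =====
-- def count_transitions_until_target(path, target_location):
--     if len(path) < 2:
--         return 0
--     if path[0] == target_location: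
--         return 0
--     # phase 1: locate the first index >= 1 holding the target (default: len(path))
--     end = len(path)
--     for i in range(1, len(path)):
--         if path[i] == target_location:
--             end = i
--             break
--     # phase 2: count transitions over the inclusive prefix path[0..end]
--     return sum(1 for a, b in zip(path[:end], path[1:end + 1]) if a != b)
-- ===== Notes on version B (the rewrite author's own statement) =====
-- stated objective: alternative
-- what changed: Replaces A's single fused scan (counting and break-detection interleaved with carried prev state) by a two-phase locate-then-count: first find the index of the target, then count adjacent unequal pairs over the inclusive prefix via zip.
import Mathlib
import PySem

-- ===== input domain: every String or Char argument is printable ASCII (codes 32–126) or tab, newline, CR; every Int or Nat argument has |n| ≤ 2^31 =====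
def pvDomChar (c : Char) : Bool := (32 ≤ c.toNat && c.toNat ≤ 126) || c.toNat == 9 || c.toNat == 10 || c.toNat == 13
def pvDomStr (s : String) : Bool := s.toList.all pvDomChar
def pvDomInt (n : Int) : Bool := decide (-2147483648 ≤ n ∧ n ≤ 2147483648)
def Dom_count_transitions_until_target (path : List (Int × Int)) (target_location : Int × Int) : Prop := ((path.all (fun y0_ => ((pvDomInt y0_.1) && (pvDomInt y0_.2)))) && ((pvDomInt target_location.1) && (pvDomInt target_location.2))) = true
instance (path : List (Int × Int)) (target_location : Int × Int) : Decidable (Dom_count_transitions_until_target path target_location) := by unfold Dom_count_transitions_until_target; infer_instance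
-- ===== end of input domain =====

-- B replaces A's fused scan by a locate-then-count two-phase structure (objective: alternative; same cost).


-- ===== PORT A =====
-- the 'for point in path[1:] … break' loop, carrying (prev_point, transitions)
def ctuLoopA : List (Int × Int) → (Int × Int) → Int → (Int × Int) → Int
  | [], _, transitions, _ => transitions
  | point :: rest, prev_point, transitions, target_location =>
    let transitions' := if point ≠ prev_point then transitions + 1 else transitions
    if point = target_location then transitions'
    else ctuLoopA rest point transitions' target_location

def count_transitions_until_target (path : List (Int × Int)) (target_location : Int × Int) : Int :=
  if path.length < 2 then 0
  else
    match path with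
    | [] => 0  -- unreachable: length ≥ 2
    | prev_point :: rest =>
      if prev_point = target_location then 0
      else ctuLoopA rest prev_point 0 target_location

-- ===== PORT B =====
-- phase 1: first index i ≥ 1 with path[i] = target, default len(path)
def ctuFindEnd : List (Int × Int) → Nat → (Int × Int) → Nat → Nat
  | [], _, _, dflt => dflt
  | p :: rest, i, t, dflt => if p = t then i else ctuFindEnd rest (i + 1) t dflt

def count_transitions_until_target_alt (path : List (Int × Int)) (target_location : Int × Int) : Int :=
  if path.length < 2 then 0
  else
    match path with
    | [] => 0  -- unreachable: length ≥ 2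
    | h :: rest =>
      if h = target_location then 0
      else
        let e := ctuFindEnd rest 1 target_location path.length
        -- phase 2: zip(path[:e], path[1:e+1]) counting unequal adjacent pairs
        (((path.take e).zip (rest.take e)).countP (fun ab => ab.1 ≠ ab.2) : Int)

-- ===== PRECONDITION & SPEC =====
def Spec_count_transitions_until_target (path : List (Int × Int)) (target_location : Int × Int) (out : Int) : Prop := out = count_transitions_until_target_alt path target_location
instance (path : List (Int × Int)) (target_location : Int × Int) (out : Int) : Decidable (Spec_count_transitions_until_target path target_location out) := by unfold Spec_count_transitions_until_target; infer_instance

-- ===== CLAIM (what is proved, stated in full; the proofs are below) =====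
def Claim_equal_count_transitions_until_target : Prop := ∀ (path : List (Int × Int)) (target_location : Int × Int), Dom_count_transitions_until_target path target_location → Spec_count_transitions_until_target path target_location (count_transitions_until_target path target_location)

-- ===== LEMMAS AND PROOFS =====

-- A's loop, with the accumulator factored out: the pure count
def ctuZ : List (Int × Int) → (Int × Int) → (Int × Int) → Nat
  | [], _, _ => 0
  | p :: rest, prev, t =>
    (if p ≠ prev then 1 else 0) + (if p = t then 0 else ctuZ rest p t)

theorem ctuLoopA_eq_Z (l : List (Int × Int)) (prev : Int × Int) (acc : Int) (t : Int × Int) :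
    ctuLoopA l prev acc t = acc + (ctuZ l prev t : Int) := by
  induction l generalizing prev acc with
  | nil => simp [ctuLoopA, ctuZ]
  | cons p rest ih =>
    simp only [ctuLoopA, ctuZ]
    by_cases hp : p = t <;> by_cases hne : p = prev <;>
      simp [hp, hne, ih] <;> (try split_ifs) <;> omega

theorem ctuFindEnd_eq (l : List (Int × Int)) (t : Int × Int) (i : Nat) :
    ctuFindEnd l i t (i + l.length) = i + l.findIdx (fun p => p = t) := by
  induction l generalizing i with
  | nil => simp [ctuFindEnd]
  | cons p rest ih =>
    simp only [ctuFindEnd, List.findIdx_cons, List.length_cons]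
    by_cases hp : p = t
    · simp [hp]
    · have h2 : i + (rest.length + 1) = (i + 1) + rest.length := by omega
      rw [if_neg hp, h2, ih (i + 1)]
      simp [hp]
      omega

theorem ctuCount_eq_Z (l : List (Int × Int)) (h t : Int × Int) :
    (((h :: l).take (l.findIdx (fun p => p = t) + 1)).zip
        (l.take (l.findIdx (fun p => p = t) + 1))).countP (fun ab => ab.1 ≠ ab.2)
      = ctuZ l h t := by
  induction l generalizing h with
  | nil => simp [ctuZ]
  | cons p rest ih =>
    simp only [List.findIdx_cons]
    by_cases hp : p = t
    · subst hp
      simp only [decide_true, cond_true, List.take_succ_cons, List.take_zero,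
        List.zip_cons_cons, List.zip_nil_right, List.countP_cons, List.countP_nil, ctuZ]
      by_cases hne : h = p
      · simp [hne]
      · simp [hne, Ne.symm hne]
    · have hd : (decide (p = t)) = false := by simp [hp]
      have h2 := ih p
      simp only [List.take_succ_cons, ne_eq, decide_not] at h2
      simp only [hd, cond_false, List.take_succ_cons, List.zip_cons_cons,
        List.countP_cons, ctuZ, if_neg hp, ne_eq, decide_not]
      rw [h2]
      by_cases hne : h = p
      · simp [hne]
      · simp [hne, Ne.symm hne]; omega

-- ===== VERDICT (by name: the statement is the Claim_ definition above) =====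
theorem count_transitions_until_target_spec : Claim_equal_count_transitions_until_target := by
  intro path t _
  unfold Spec_count_transitions_until_target
  unfold count_transitions_until_target count_transitions_until_target_alt
  by_cases hlen : path.length < 2
  · simp [hlen]
  · match path with
    | [] => simp at hlen
    | h :: rest =>
      simp only [if_neg hlen]
      by_cases hh : h = t
      · simp [hh]
      · simp only [if_neg hh]
        have hfe : ctuFindEnd rest 1 t (h :: rest).length
            = rest.findIdx (fun p => p = t) + 1 := by
          have h1 : (h :: rest).length = 1 + rest.length := by
            simp [Nat.add_comm]
          rw [h1, ctuFindEnd_eq]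
          omega
        rw [ctuLoopA_eq_Z]
        simp only [hfe]
        rw [← ctuCount_eq_Z rest h t]
        omega
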